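-- pv_equiv track=rewrite | github.com/rick2047/WrestleGM | .github/scripts/pytest_comment.py | render_comment
-- ===== SOURCE A (Python) =====
-- from collections import Counter, defaultdict
--
-- STATUS_ORDER = ("failed", "error", "skipped", "passed")
--
-- def group_name(classname: str) -> str:
--     """Build a readable group name based on the pytest classname."""
--
--     if not classname:
--         return "Module-level tests (unknown)"
--     parts = classname.split(".")
--     if len(parts) > 1 and parts[-1].startswith("Test"):
--         module = ".".join(parts[:-1])
--         return f"{parts[-1]} ({module})"
--     return f"Module-level tests ({classname})"
--
-- def render_comment(
--     cases: list[dict[str, str]],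
--     run_url: str,
--     error_note: str | None = None,
-- ) -> str:
--     """Render the markdown comment body."""
--
--     counts = Counter(case["status"] for case in cases)
--     status = "PASSED"
--     if counts.get("failed") or counts.get("error"):
--         status = "FAILED"
--     elif not cases:
--         status = "NO TESTS"
--
--     lines: list[str] = ["<!-- pr-tests -->", "## PR Test Results"]
--     lines.append(f"Status: {status}")
--     lines.append(f"Run: {run_url}")
--     totals = ", ".join(f"{counts.get(key, 0)} {key}" for key in STATUS_ORDER)
--     lines.append(f"Totals: {totals}")
--     if error_note:
--         lines.append("")
--         lines.append(f"Note: {error_note}")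
--     lines.append("")
--
--     grouped: dict[str, list[dict[str, str]]] = defaultdict(list)
--     for case in cases:
--         grouped[group_name(case["classname"])].append(case)
--
--     for group in sorted(grouped):
--         group_counts = Counter(item["status"] for item in grouped[group])
--         summary_counts = ", ".join(
--             f"{group_counts.get(key, 0)} {key}" for key in STATUS_ORDER
--         )
--         lines.append("<details>")
--         lines.append(f"<summary>{group} ({summary_counts})</summary>")
--         lines.append("")
--         for case in sorted(grouped[group], key=lambda item: item["name"]):
--             reason = case["reason"]
--             suffix = f" - {reason}" if reason else ""
--             lines.append(f"- `{case['name']}` - {case['status'].upper()}{suffix}")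
--         lines.append("")
--         lines.append("</details>")
--
--     return "\n".join(lines).strip() + "\n"
-- ===== SOURCE B (Python) =====
-- STATUS_ORDER = ("failed", "error", "skipped", "passed")
--
-- def group_name(classname: str) -> str:
--     if not classname:
--         return "Module-level tests (unknown)"
--     parts = classname.split(".")
--     if len(parts) > 1 and parts[-1].startswith("Test"):
--         module = ".".join(parts[:-1])
--         return f"{parts[-1]} ({module})"
--     return f"Module-level tests ({classname})"
--
-- def _tally(statuses):
--     return ", ".join(f"{statuses.count(key)} {key}" for key in STATUS_ORDER)
--
-- def _row(c):
--     return f"- `{c['name']}` - {c['status'].upper()}" + (f" - {c['reason']}" if c["reason"] else "")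
--
-- def _block(g, run):
--     rows = "\n".join(_row(c) for c in run)
--     return (f"<details>\n<summary>{g} ({_tally([c['status'] for c in run])})</summary>\n\n"
--             + rows + "\n\n</details>")
--
-- def render_comment(cases, run_url, error_note=None):
--     statuses = [case["status"] for case in cases]
--     if "failed" in statuses or "error" in statuses:
--         status = "FAILED"
--     elif statuses:
--         status = "PASSED"
--     else:
--         status = "NO TESTS"
--
--     header = ("<!-- pr-tests -->\n## PR Test Results\n"
--               f"Status: {status}\nRun: {run_url}\nTotals: {_tally(statuses)}")
--     if error_note:
--         header += f"\n\nNote: {error_note}"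
--
--     ordered = sorted(cases, key=lambda c: (group_name(c["classname"]), c["name"]))
--     blocks = []
--     rest = ordered
--     while rest:
--         g = group_name(rest[0]["classname"])
--         run = [c for c in rest if group_name(c["classname"]) == g]  # the leading run: rest is group-sorted
--         rest = rest[len(run):]
--         blocks.append(_block(g, run))
--
--     return "\n".join([header + "\n"] + blocks).strip() + "\n"
-- ===== Notes on version B (the rewrite author's own statement) =====
-- stated objective: alternative
-- what changed: drops Counter and the defaultdict grouping entirely: status comes from membership tests, tallies from list.count, groups from one run-splitting scan over a single (group, name)-sorted list, and the body is assembled from concatenated block strings instead of a flat line list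
import Mathlib
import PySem

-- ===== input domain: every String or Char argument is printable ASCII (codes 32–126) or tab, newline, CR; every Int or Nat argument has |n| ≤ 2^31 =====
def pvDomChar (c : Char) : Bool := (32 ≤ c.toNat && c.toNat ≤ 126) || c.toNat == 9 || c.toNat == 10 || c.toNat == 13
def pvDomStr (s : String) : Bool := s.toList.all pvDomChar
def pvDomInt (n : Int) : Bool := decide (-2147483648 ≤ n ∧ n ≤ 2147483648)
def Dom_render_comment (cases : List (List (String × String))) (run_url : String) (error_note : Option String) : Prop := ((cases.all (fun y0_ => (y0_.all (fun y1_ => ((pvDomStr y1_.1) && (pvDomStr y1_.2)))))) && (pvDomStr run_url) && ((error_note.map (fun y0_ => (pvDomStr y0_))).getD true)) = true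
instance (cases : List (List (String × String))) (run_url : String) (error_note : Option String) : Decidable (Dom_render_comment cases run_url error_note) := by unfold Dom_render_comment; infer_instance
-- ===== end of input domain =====

-- B drops A's Counter and defaultdict grouping: status by membership, tallies by list.count,
-- groups by one run-splitting scan of a single (group, name)-sorted list, output assembled
-- from concatenated block strings instead of a flat line list; same output, similar cost.

-- ===== PORT A =====
-- shared module context (both Pythons use the same helpers / constants)
def STATUS_ORDER : List String := ["failed", "error", "skipped", "passed"]

-- case[k] (dict lookup); total form, exact under Pre_ (all four keys present)
def pvGet (c : List (String × String)) (k : String) : String :=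
  ((PySem.Dict.mk c).get? k).getD ""

def group_name (classname : String) : String :=
  if classname = "" then "Module-level tests (unknown)"
  else
    let parts := (PySem.Str.split? classname ".").getD []  -- sep "." ≠ "": split? is some
    if decide (parts.length > 1) && PySem.Str.startswith ((PySem.List.pyGet? parts (-1)).getD "") "Test" then
      ((PySem.List.pyGet? parts (-1)).getD "") ++ " (" ++
        PySem.Str.join "." (PySem.List.slice parts none (some (-1))) ++ ")"
    else
      "Module-level tests (" ++ classname ++ ")"

-- truthiness of error_note (Optional str): used by both Pythons ('if error_note:')
def pvTruthyNote (o : Option String) : Bool := match o with | none => false | some s => s != ""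

-- f"- `{name}` - {STATUS}{suffix}" (A builds it inline, B's _row helper is the same f-string)
def pvCaseLine (c : List (String × String)) : String :=
  "- `" ++ pvGet c "name" ++ "` - " ++ PySem.Str.upper (pvGet c "status") ++
    (if pvGet c "reason" != "" then " - " ++ pvGet c "reason" else "")

-- A only: truthiness of counts.get(k) (Optional int)
def pvTruthyCount (o : Option Int) : Bool := match o with | none => false | some n => n != 0

-- A only: ", ".join(f"{d.get(key, 0)} {key}" for key in STATUS_ORDER) over a Counter dict
def pvTotals (d : PySem.Dict String Int) : String :=
  PySem.Str.join ", " (STATUS_ORDER.map (fun k => PySem.Int.toStr (d.getD k 0) ++ " " ++ k))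

def render_comment (cases : List (List (String × String))) (run_url : String) (error_note : Option String) : String :=
  let counts := PySem.Dict.counter (cases.map (fun c => pvGet c "status"))
  let status :=
    if pvTruthyCount (counts.get? "failed") || pvTruthyCount (counts.get? "error") then "FAILED"
    else if cases.isEmpty then "NO TESTS"
    else "PASSED"
  let lines := ["<!-- pr-tests -->", "## PR Test Results"]
  let lines := lines ++ ["Status: " ++ status]
  let lines := lines ++ ["Run: " ++ run_url]
  let lines := lines ++ ["Totals: " ++ pvTotals counts]
  let lines := if pvTruthyNote error_note then lines ++ ["", "Note: " ++ error_note.getD ""] else lines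
  let lines := lines ++ [""]
  let grouped := cases.foldl
    (fun d c => d.modify (group_name (pvGet c "classname")) [] (fun l => l ++ [c]))
    PySem.Dict.empty
  let lines := (PySem.List.sorted grouped.keys (fun g => g) false).foldl
    (fun acc g =>
      let members := grouped.getD g []
      let gcounts := PySem.Dict.counter (members.map (fun c => pvGet c "status"))
      acc ++ ["<details>", "<summary>" ++ g ++ " (" ++ pvTotals gcounts ++ ")</summary>", ""]
        ++ (PySem.List.sorted members (fun c => pvGet c "name") false).map pvCaseLine
        ++ ["", "</details>"])
    lines
  PySem.Str.strip (PySem.Str.join "\n" lines) ++ "\n"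

-- ===== PORT B =====
-- B's _tally: ", ".join(f"{statuses.count(key)} {key}" for key in STATUS_ORDER) — plain list.count, no dict
def pvTally (sts : List String) : String :=
  PySem.Str.join ", " (STATUS_ORDER.map (fun k => PySem.Int.toStr (PySem.List.count sts k : Int) ++ " " ++ k))

-- B's _block: one <details> section as a single string
def pvBlockStr (g : String) (run : List (List (String × String))) : String :=
  let rows := PySem.Str.join "\n" (run.map pvCaseLine)
  "<details>\n<summary>" ++ g ++ " (" ++ pvTally (run.map (fun c => pvGet c "status")) ++ ")</summary>\n\n"
    ++ rows ++ "\n\n</details>"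

-- B's while loop: peel the leading same-group run off the (group, name)-sorted list
def pvBlocks : List (List (String × String)) → List String
  | [] => []
  | r :: rs =>
    let g := group_name (pvGet r "classname")
    let run := (r :: rs).filter (fun c => group_name (pvGet c "classname") == g)
    pvBlockStr g run :: pvBlocks ((r :: rs).drop run.length)
termination_by l => l.length
decreasing_by
  simp only [List.length_drop]
  have h1 : 0 < ((r :: rs).filter
      (fun c => group_name (pvGet c "classname") == group_name (pvGet r "classname"))).length := by
    rw [List.filter_cons_of_pos (by simp)]
    simp
  simp only [List.length_cons] at *
  omega

def render_comment_alt (cases : List (List (String × String))) (run_url : String) (error_note : Option String) : String :=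
  let statuses := cases.map (fun c => pvGet c "status")
  let status :=
    if statuses.contains "failed" || statuses.contains "error" then "FAILED"
    else if !statuses.isEmpty then "PASSED"
    else "NO TESTS"
  let header := "<!-- pr-tests -->\n## PR Test Results\nStatus: " ++ status
    ++ "\nRun: " ++ run_url ++ "\nTotals: " ++ pvTally statuses
  let header := if pvTruthyNote error_note then header ++ "\n\nNote: " ++ error_note.getD "" else header
  let ordered := PySem.List.sorted2 cases
    (fun c => group_name (pvGet c "classname")) (fun c => pvGet c "name") false
  PySem.Str.strip (PySem.Str.join "\n" ((header ++ "\n") :: pvBlocks ordered)) ++ "\n"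

-- ===== PRECONDITION & SPEC =====
-- A subscripts every case with "status", "classname", "name" and "reason"; on a case
-- missing one of those keys Python raises KeyError, so exactly those inputs are excluded.
def Pre_render_comment (cases : List (List (String × String))) (run_url : String) (error_note : Option String) : Prop :=
  ∀ c ∈ cases, (PySem.Dict.mk c).contains "status" = true ∧ (PySem.Dict.mk c).contains "classname" = true
    ∧ (PySem.Dict.mk c).contains "name" = true ∧ (PySem.Dict.mk c).contains "reason" = true
instance (cases : List (List (String × String))) (run_url : String) (error_note : Option String) : Decidable (Pre_render_comment cases run_url error_note) := by unfold Pre_render_comment; infer_instance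

def pvWitness_render_comment : (List (List (String × String))) × String × Option String :=
  ([[("status", "passed"), ("classname", "a.TestX"), ("name", "t1"), ("reason", "")],
    [("status", "failed"), ("classname", ""), ("name", "t0"), ("reason", "boom")]],
   "http://example/run/1", some "note")

def Spec_render_comment (cases : List (List (String × String))) (run_url : String) (error_note : Option String) (out : String) : Prop := out = render_comment_alt cases run_url error_note
instance (cases : List (List (String × String))) (run_url : String) (error_note : Option String) (out : String) : Decidable (Spec_render_comment cases run_url error_note out) := by unfold Spec_render_comment; infer_instance

-- ===== CLAIM (what is proved, stated in full; the proofs are below) =====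
def Claim_equal_render_comment : Prop := ∀ (cases : List (List (String × String))) (run_url : String) (error_note : Option String), Dom_render_comment cases run_url error_note → Pre_render_comment cases run_url error_note → Spec_render_comment cases run_url error_note (render_comment cases run_url error_note)

-- ===== LEMMAS AND PROOFS =====

-- proof-side abbreviations
def pvLexB {α : Type} (g n : α → String) : α → α → Bool :=
  fun a b => decide (g a < g b) || (!decide (g b < g a) && decide (n a < n b))

def pvNameB {α : Type} (n : α → String) : α → α → Bool := fun a b => decide (n a < n b)

def pvBuck {α : Type} (g n : α → String) (xs : List α) (k : String) : List α :=
  PySem.List.sorted (xs.filter (fun x => g x == k)) n false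

def pvGroups {α : Type} (g : α → String) (xs : List α) : List String :=
  PySem.List.sorted (PySem.Set.ofList (xs.map g)) (fun k => k) false

theorem pv_insertBy_skip {α : Type} (before : α → α → Bool) (x : α) (as bs : List α)
    (h : ∀ a ∈ as, before x a = false) :
    PySem.List.insertBy before x (as ++ bs) = as ++ PySem.List.insertBy before x bs := by
  induction as with
  | nil => simp
  | cons a t ih =>
    have ha := h a (by simp)
    rw [List.cons_append, PySem.List.insertBy.eq_2, ha]
    simp only [Bool.false_eq_true, if_false, List.cons_append, List.cons.injEq, true_and]
    exact ih (fun a ha' => h a (by simp [ha']))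

theorem pv_insertBy_within {α : Type} (before before' : α → α → Bool) (x : α) (as bs : List α)
    (h1 : ∀ a ∈ as, before x a = before' x a) (h2 : ∀ b ∈ bs, before x b = true) :
    PySem.List.insertBy before x (as ++ bs) = PySem.List.insertBy before' x as ++ bs := by
  induction as with
  | nil =>
    cases bs with
    | nil => rfl
    | cons b t => rw [List.nil_append, PySem.List.insertBy.eq_2, h2 b (by simp)]; rfl
  | cons a t ih =>
    have ha := h1 a (by simp)
    rw [List.cons_append, PySem.List.insertBy.eq_2, ha, PySem.List.insertBy.eq_2]
    by_cases hb : before' x a = true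
    · rw [hb]; simp
    · rw [Bool.not_eq_true] at hb
      rw [hb]
      simp only [Bool.false_eq_true, if_false, List.cons_append, List.cons.injEq, true_and]
      exact ih (fun a ha' => h1 a (by simp [ha']))

theorem pv_sorted_append_singleton {α κ : Type} [LinearOrder κ] (l : List α) (x : α) (key : α → κ) :
    PySem.List.sorted (l ++ [x]) key false
      = PySem.List.insertBy (fun a b => decide (key a < key b)) x (PySem.List.sorted l key false) := by
  rw [PySem.List.sorted_eq_foldl_insertBy, PySem.List.sorted_eq_foldl_insertBy, List.foldl_append]
  rfl

theorem pv_sorted2_eq_foldl {α : Type} (xs : List α) (k1 k2 : α → String) :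
    PySem.List.sorted2 xs k1 k2 false
      = xs.foldl (fun acc x => PySem.List.insertBy (pvLexB k1 k2) x acc) [] := rfl

theorem pv_dropWhile_gt (G : List String) (k : String) (hpw : G.Pairwise (· < ·)) (hk : k ∉ G) :
    ∀ b ∈ G.dropWhile (fun a => decide (a < k)), k < b := by
  induction G with
  | nil => simp
  | cons a t ih =>
    rw [List.dropWhile_cons]
    by_cases ha : a < k
    · simp only [decide_eq_true_eq, ha, if_true]
      exact ih (List.pairwise_cons.mp hpw).2 (fun h => hk (by simp [h]))
    · simp only [decide_eq_true_eq, ha, if_false]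
      intro b hb
      have hka : k < a := lt_of_le_of_ne (le_of_not_gt ha) (fun h => hk (by simp [h]))
      rcases List.mem_cons.mp hb with rfl | hbt
      · exact hka
      · exact lt_trans hka ((List.pairwise_cons.mp hpw).1 b hbt)

theorem pv_mem_buck {α : Type} (g n : α → String) (xs : List α) (k : String) (a : α)
    (ha : a ∈ pvBuck g n xs k) : g a = k := by
  unfold pvBuck at ha
  rw [PySem.List.mem_sorted] at ha
  simpa using (List.mem_filter.mp ha).2

theorem pv_groups_pairwise {α : Type} (g : α → String) (xs : List α) :
    (pvGroups g xs).Pairwise (· < ·) :=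
  PySem.List.sorted_ofList_pairwise_lt (xs.map g)

theorem pv_mem_groups {α : Type} (g : α → String) (xs : List α) (j : String) :
    j ∈ pvGroups g xs ↔ j ∈ xs.map g := by
  unfold pvGroups
  rw [PySem.List.mem_sorted, PySem.Set.mem_ofList]

-- the bucket decomposition of Python's stable tuple-key sort
theorem pv_sorted2_flatMap {α : Type} (xs : List α) (g n : α → String) :
    PySem.List.sorted2 xs g n false = (pvGroups g xs).flatMap (pvBuck g n xs) := by
  induction xs using List.reverseRecOn with
  | nil => rfl
  | append_singleton xs x ih =>
    have hL : PySem.List.sorted2 (xs ++ [x]) g n false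
        = PySem.List.insertBy (pvLexB g n) x (PySem.List.sorted2 xs g n false) := by
      rw [pv_sorted2_eq_foldl, pv_sorted2_eq_foldl, List.foldl_append]
      rfl
    rw [hL, ih]
    have hbuck_ne : ∀ j, j ≠ g x → pvBuck g n (xs ++ [x]) j = pvBuck g n xs j := by
      intro j hj
      unfold pvBuck
      rw [List.filter_append]
      simp [Ne.symm hj]
    have hbuck_k : pvBuck g n (xs ++ [x]) (g x)
        = PySem.List.insertBy (pvNameB n) x (pvBuck g n xs (g x)) := by
      unfold pvBuck
      rw [List.filter_append]
      simp only [List.filter_cons, List.filter_nil, BEq.rfl, if_true]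
      rw [pv_sorted_append_singleton]
      rfl
    have hofl : PySem.Set.ofList ((xs ++ [x]).map g)
        = PySem.Set.add (PySem.Set.ofList (xs.map g)) (g x) := by
      rw [List.map_append]
      simp [PySem.Set.ofList, List.foldl_append]
    by_cases hmem : g x ∈ xs.map g
    · -- the group of x already exists: the group list is unchanged
      have hGeq : pvGroups g (xs ++ [x]) = pvGroups g xs := by
        unfold pvGroups
        rw [hofl]
        unfold PySem.Set.add
        rw [if_pos (show (PySem.Set.ofList (xs.map g)).contains (g x) = true by
          simpa [PySem.Set.mem_ofList] using hmem)]
      obtain ⟨L, R, hsplit⟩ := List.append_of_mem ((pv_mem_groups g xs (g x)).mpr hmem)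
      have hpw := pv_groups_pairwise g xs
      rw [hsplit] at hpw
      have hpwA := List.pairwise_append.mp hpw
      have hLlt : ∀ a ∈ L, a < g x := fun a ha => hpwA.2.2 a ha (g x) (by simp)
      have hRgt : ∀ b ∈ R, g x < b := (List.pairwise_cons.mp hpwA.2.1).1
      rw [hGeq, hsplit, List.flatMap_append, List.flatMap_cons]
      have hskip : ∀ a ∈ L.flatMap (pvBuck g n xs), pvLexB g n x a = false := by
        intro a ha
        obtain ⟨j, hj, haj⟩ := List.mem_flatMap.mp ha
        have hga : g a = j := pv_mem_buck g n xs j a haj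
        have hjk : j < g x := hLlt j hj
        simp [pvLexB, hga, hjk, asymm hjk]
      have hwithin : ∀ a ∈ pvBuck g n xs (g x), pvLexB g n x a = pvNameB n x a := by
        intro a ha
        have hga : g a = g x := pv_mem_buck g n xs (g x) a ha
        simp [pvLexB, pvNameB, hga]
      have htrue : ∀ b ∈ R.flatMap (pvBuck g n xs), pvLexB g n x b = true := by
        intro b hb
        obtain ⟨j, hj, hbj⟩ := List.mem_flatMap.mp hb
        have hgb : g b = j := pv_mem_buck g n xs j b hbj
        simp [pvLexB, hgb, hRgt j hj]
      rw [pv_insertBy_skip _ _ _ _ hskip, pv_insertBy_within _ _ _ _ _ hwithin htrue]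
      rw [List.flatMap_append, List.flatMap_cons, hbuck_k]
      rw [List.flatMap_congr (fun j hj => hbuck_ne j (ne_of_lt (hLlt j hj)))]
      rw [List.flatMap_congr (fun j hj => hbuck_ne j (ne_of_gt (hRgt j hj)))]
    · -- new group: g x is inserted between the smaller and the larger group names
      have hknotin : g x ∉ pvGroups g xs := fun h => hmem ((pv_mem_groups g xs (g x)).mp h)
      have hpw := pv_groups_pairwise g xs
      have hGperm : (pvGroups g xs).Perm (PySem.Set.ofList (xs.map g)) :=
        PySem.List.sorted_perm _ _ _
      have hLdef : (pvGroups g xs).takeWhile (fun a => decide (a < g x))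
          ++ (pvGroups g xs).dropWhile (fun a => decide (a < g x)) = pvGroups g xs :=
        List.takeWhile_append_dropWhile
      set L := (pvGroups g xs).takeWhile (fun a => decide (a < g x)) with hLd
      set R := (pvGroups g xs).dropWhile (fun a => decide (a < g x)) with hRd
      have hLlt : ∀ a ∈ L, a < g x := by
        intro a ha
        simpa using List.mem_takeWhile_imp ha
      have hRgt : ∀ b ∈ R, g x < b := pv_dropWhile_gt _ _ hpw hknotin
      have hGnew : pvGroups g (xs ++ [x]) = L ++ g x :: R := by
        unfold pvGroups
        rw [hofl]
        have hadd : PySem.Set.add (PySem.Set.ofList (xs.map g)) (g x)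
            = PySem.Set.ofList (xs.map g) ++ [g x] := by
          unfold PySem.Set.add
          rw [if_neg]
          intro hc
          exact hmem ((PySem.Set.mem_ofList (xs.map g) (g x)).mp (by simpa using hc))
        rw [hadd]
        apply PySem.List.sorted_eq_of_perm_of_pairwise_lt
        · have h1 : (L ++ g x :: R).Perm (g x :: (L ++ R)) := List.perm_middle
          rw [hLd, hRd, hLdef] at h1
          exact h1.trans ((hGperm.cons (g x)).trans (List.perm_append_singleton _ _).symm)
        · rw [List.pairwise_append]
          refine ⟨List.Pairwise.sublist (List.takeWhile_sublist _) hpw, ?_, ?_⟩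
          · rw [List.pairwise_cons]
            exact ⟨hRgt, List.Pairwise.sublist (List.dropWhile_sublist _) hpw⟩
          · intro a ha b hb
            rcases List.mem_cons.mp hb with rfl | hbR
            · exact hLlt a ha
            · exact lt_trans (hLlt a ha) (hRgt b hbR)
      rw [hGnew]
      conv_lhs => rw [← hLdef]
      rw [List.flatMap_append]
      have hskip : ∀ a ∈ L.flatMap (pvBuck g n xs), pvLexB g n x a = false := by
        intro a ha
        obtain ⟨j, hj, haj⟩ := List.mem_flatMap.mp ha
        have hga : g a = j := pv_mem_buck g n xs j a haj
        have hjk : j < g x := hLlt j hj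
        simp [pvLexB, hga, hjk, asymm hjk]
      have htrue : ∀ b ∈ R.flatMap (pvBuck g n xs), pvLexB g n x b = true := by
        intro b hb
        obtain ⟨j, hj, hbj⟩ := List.mem_flatMap.mp hb
        have hgb : g b = j := pv_mem_buck g n xs j b hbj
        simp [pvLexB, hgb, hRgt j hj]
      rw [pv_insertBy_skip _ _ _ _ hskip]
      rw [show R.flatMap (pvBuck g n xs) = [] ++ R.flatMap (pvBuck g n xs) from rfl,
          pv_insertBy_within (pvLexB g n) (pvNameB n) x [] _ (by simp) htrue]
      rw [List.flatMap_append, List.flatMap_cons]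
      have hbk : pvBuck g n (xs ++ [x]) (g x) = [x] := by
        rw [hbuck_k]
        have : pvBuck g n xs (g x) = [] := by
          unfold pvBuck
          rw [List.filter_eq_nil_iff.mpr]
          · rfl
          · intro c hc hgc
            exact hmem (by simp only [List.mem_map]; exact ⟨c, hc, by simpa using hgc.symm⟩)
        rw [this]
        rfl
      rw [hbk]
      rw [List.flatMap_congr (fun j hj => hbuck_ne j (ne_of_lt (hLlt j hj)))]
      rw [List.flatMap_congr (fun j hj => hbuck_ne j (ne_of_gt (hRgt j hj)))]
      rfl

theorem pv_grouped_getD {α : Type} [DecidableEq α] (cases : List α) (key : α → String) (k : String) :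
    (cases.foldl (fun d c => d.modify (key c) [] (fun l => l ++ [c])) PySem.Dict.empty).getD k []
      = cases.filter (fun c => key c == k) := by
  have h1 : cases.foldl (fun d c => d.modify (key c) [] (fun l => l ++ [c])) PySem.Dict.empty
      = (cases.map (fun c => (key c, c))).foldl
          (fun d p => d.modify p.1 [] (fun l => l ++ [p.2])) PySem.Dict.empty := by
    rw [List.foldl_map]
  rw [h1, PySem.Dict.getD_foldl_modify_append]
  simp [List.filter_map, Function.comp_def]

theorem pv_grouped_keys {α : Type} (cases : List α) (key : α → String) :
    (cases.foldl (fun d c => d.modify (key c) [] (fun l => l ++ [c])) PySem.Dict.empty).keys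
      = PySem.Set.ofList (cases.map key) := by
  rw [PySem.Dict.keys_foldl_modify_key cases key [] (fun d x => (fun l => l ++ [x]))]
  rw [PySem.Dict.keys_empty, PySem.Set.update_nil_left]

-- A's counts.get(k) is truthy exactly when k occurs in the status list
theorem pv_truthy_counter (l : List String) (k : String) :
    pvTruthyCount ((PySem.Dict.counter l).get? k) = l.contains k := by
  cases h : (PySem.Dict.counter l).get? k with
  | none =>
    have hc : (PySem.Dict.counter l).contains k = false := by
      rw [PySem.Dict.contains_eq_isSome_get?, h]; rfl
    rw [PySem.Dict.contains_counter] at hc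
    rw [hc]
    rfl
  | some n =>
    have hc : (PySem.Dict.counter l).contains k = true := by
      rw [PySem.Dict.contains_eq_isSome_get?, h]; rfl
    have hmem : k ∈ l := by
      rw [PySem.Dict.contains_counter] at hc
      simpa using hc
    have hn : n = (l.count k : Int) := by
      have hgd := PySem.Dict.getD_counter l k
      rw [PySem.Dict.getD_eq_get?_getD, h] at hgd
      simpa using hgd
    have hpos : 0 < l.count k := List.count_pos_iff.mpr hmem
    simp only [pvTruthyCount, hn]
    simp only [List.contains_eq_mem, hmem, decide_true]
    simpa using (by omega : (l.count k : Int) ≠ 0)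

-- A's Counter-based totals line equals B's list.count-based tally
theorem pv_totals_tally (l : List String) : pvTotals (PySem.Dict.counter l) = pvTally l := by
  unfold pvTotals pvTally
  congr 1
  apply List.map_congr_left
  intro k _
  rw [PySem.Dict.getD_counter, PySem.List.count_eq]

theorem pv_tally_perm (l1 l2 : List String) (h : l1.Perm l2) : pvTally l1 = pvTally l2 := by
  unfold pvTally
  congr 1
  apply List.map_congr_left
  intro k _
  rw [PySem.List.count_eq, PySem.List.count_eq, h.count_eq]

-- Str.join over nonempty halves
theorem pv_join_cons_cons (s p q : String) (rest : List String) :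
    PySem.Str.join s (p :: q :: rest) = p ++ s ++ PySem.Str.join s (q :: rest) := by
  unfold PySem.Str.join
  rw [List.map_cons, List.map_cons, PySem.Chars.join_cons_cons]
  rw [String.ofList_append, String.ofList_append, String.ofList_toList, String.ofList_toList]

theorem pv_join_singleton (s p : String) : PySem.Str.join s [p] = p := by
  unfold PySem.Str.join
  rw [List.map_cons, List.map_nil, PySem.Chars.join_singleton, String.ofList_toList]

theorem pv_join_append (s : String) (xs ys : List String) (hx : xs ≠ []) (hy : ys ≠ []) :
    PySem.Str.join s (xs ++ ys) = PySem.Str.join s xs ++ s ++ PySem.Str.join s ys := by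
  induction xs with
  | nil => exact absurd rfl hx
  | cons x t ih =>
    cases t with
    | nil =>
      cases ys with
      | nil => exact absurd rfl hy
      | cons y u => rw [List.singleton_append, pv_join_cons_cons, pv_join_singleton]
    | cons a u =>
      rw [show (x :: a :: u) ++ ys = x :: a :: (u ++ ys) from rfl, pv_join_cons_cons]
      rw [show a :: (u ++ ys) = (a :: u) ++ ys from rfl, ih (by simp)]
      rw [pv_join_cons_cons]
      simp [String.append_assoc]

-- joining a flattened list of nonempty line groups = joining the per-group joins
theorem pv_join_flatMap {α : Type} (s : String) (L : List α) (f : α → List String)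
    (h : ∀ j ∈ L, f j ≠ []) :
    PySem.Str.join s (L.flatMap f) = PySem.Str.join s (L.map (fun j => PySem.Str.join s (f j))) := by
  induction L with
  | nil => rfl
  | cons j L' ih =>
    rw [List.flatMap_cons, List.map_cons]
    cases L' with
    | nil => rw [List.flatMap_nil, List.append_nil, List.map_nil, pv_join_singleton]
    | cons j' L'' =>
      have hflat : (j' :: L'').flatMap f ≠ [] := by
        rw [List.flatMap_cons]
        cases hf : f j' with
        | nil => exact absurd hf (h j' (by simp))
        | cons a t => simp
      obtain ⟨a, t, hat⟩ := List.exists_cons_of_ne_nil hflat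
      rw [pv_join_append s (f j) _ (h j (by simp)) hflat,
        ih (fun x hx => h x (by simp [hx])), List.map_cons, pv_join_cons_cons]

theorem pvBlocks_cons (r : List (String × String)) (rs : List (List (String × String))) :
    pvBlocks (r :: rs)
      = pvBlockStr (group_name (pvGet r "classname"))
          ((r :: rs).filter (fun c => group_name (pvGet c "classname") == group_name (pvGet r "classname")))
        :: pvBlocks ((r :: rs).drop
            ((r :: rs).filter (fun c => group_name (pvGet c "classname") == group_name (pvGet r "classname"))).length) := by
  rw [pvBlocks]

-- B's while loop over a bucket-flattened list emits exactly one block per group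
theorem pv_blocks_flat (G : List String) (buck : String → List (List (String × String)))
    (hpw : G.Pairwise (· ≠ ·)) (hne : ∀ j ∈ G, buck j ≠ [])
    (hmem : ∀ j ∈ G, ∀ a ∈ buck j, group_name (pvGet a "classname") = j) :
    pvBlocks (G.flatMap buck) = G.map (fun j => pvBlockStr j (buck j)) := by
  induction G with
  | nil => simp [pvBlocks]
  | cons j G' ih =>
    obtain ⟨b0, bs, hb⟩ := List.exists_cons_of_ne_nil (hne j (by simp))
    have hmem_j : ∀ a ∈ buck j, group_name (pvGet a "classname") = j := hmem j (by simp)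
    have hg0 : group_name (pvGet b0 "classname") = j := hmem_j b0 (by rw [hb]; simp)
    have hin : ∀ a ∈ buck j, (group_name (pvGet a "classname")
        == group_name (pvGet b0 "classname")) = true := by
      intro a ha
      rw [hg0, hmem_j a ha]
      simp
    have hout : ∀ r ∈ G'.flatMap buck, (group_name (pvGet r "classname")
        == group_name (pvGet b0 "classname")) = false := by
      intro r hr
      obtain ⟨j', hj', hrj'⟩ := List.mem_flatMap.mp hr
      rw [hg0, hmem j' (by simp [hj']) r hrj']
      exact beq_eq_false_iff_ne.mpr (fun h => ((List.pairwise_cons.mp hpw).1 j' hj') h.symm)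
    have hfilter : (buck j ++ G'.flatMap buck).filter
        (fun c => group_name (pvGet c "classname") == group_name (pvGet b0 "classname"))
        = buck j := by
      rw [List.filter_append, List.filter_eq_self.mpr hin,
        List.filter_eq_nil_iff.mpr (fun r hr => by simp [hout r hr]), List.append_nil]
    have hcons : buck j ++ G'.flatMap buck = b0 :: (bs ++ G'.flatMap buck) := by
      rw [hb]; rfl
    rw [List.flatMap_cons, hcons, pvBlocks_cons, ← hcons, hfilter, List.drop_left, hg0,
      List.map_cons]
    exact List.cons_eq_cons.mpr ⟨rfl,
      ih (List.pairwise_cons.mp hpw).2 (fun j' hj' => hne j' (by simp [hj']))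
        (fun j' hj' => hmem j' (by simp [hj']))⟩

-- the two status expressions agree
theorem pv_status_eq (l : List String) (e : Bool) :
    (if pvTruthyCount ((PySem.Dict.counter l).get? "failed")
        || pvTruthyCount ((PySem.Dict.counter l).get? "error") then "FAILED"
     else if e then "NO TESTS" else "PASSED")
      = (if l.contains "failed" || l.contains "error" then "FAILED"
         else if !e then "PASSED" else "NO TESTS") := by
  rw [pv_truthy_counter, pv_truthy_counter]
  cases l.contains "failed" || l.contains "error" <;> cases e <;> rfl

-- A's joined header lines = B's concatenated header string
theorem pv_header_eq (s u t : String) :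
    PySem.Str.join "\n" ["<!-- pr-tests -->", "## PR Test Results",
      "Status: " ++ s, "Run: " ++ u, "Totals: " ++ t]
      = "<!-- pr-tests -->\n## PR Test Results\nStatus: " ++ s
          ++ "\nRun: " ++ u ++ "\nTotals: " ++ t := by
  have h1 : ("<!-- pr-tests -->\n## PR Test Results\nStatus: " : String)
      = "<!-- pr-tests -->" ++ "\n" ++ "## PR Test Results" ++ "\n" ++ "Status: " := by decide
  have h2 : ("\nRun: " : String) = "\n" ++ "Run: " := by decide
  have h3 : ("\nTotals: " : String) = "\n" ++ "Totals: " := by decide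
  rw [h1, h2, h3]
  simp only [pv_join_cons_cons, pv_join_singleton, String.append_assoc]

theorem pv_note_eq (h n : String) :
    h ++ "\n" ++ PySem.Str.join "\n" ["", "Note: " ++ n] = h ++ "\n\nNote: " ++ n := by
  rw [pv_join_cons_cons, pv_join_singleton]
  have h1 : ("\n\nNote: " : String) = "\n" ++ ("\n" ++ "Note: ") := by decide
  rw [h1]
  simp only [String.append_assoc, String.empty_append]

-- one foldl appending three list pieces = prefix ++ flatMap
theorem pv_foldl3 {α β : Type} (f1 f2 f3 : α → List β) (l : List α) (acc : List β) :
    l.foldl (fun acc x => acc ++ f1 x ++ f2 x ++ f3 x) acc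
      = acc ++ l.flatMap (fun x => f1 x ++ f2 x ++ f3 x) := by
  induction l generalizing acc with
  | nil => simp
  | cons x t ih =>
    rw [List.foldl_cons, ih, List.flatMap_cons]
    simp [List.append_assoc]

-- the whole-document assembly: header lines + blank + flattened block lines
-- versus (header ++ "\n") consed onto the block strings
theorem pv_join_structure (base : List String) (hbase : base ≠ []) (G : List String)
    (f : String → List String) (hf : ∀ j ∈ G, f j ≠ []) :
    PySem.Str.join "\n" ((base ++ [""]) ++ G.flatMap f)
      = PySem.Str.join "\n" ((PySem.Str.join "\n" base ++ "\n")
          :: G.map (fun j => PySem.Str.join "\n" (f j))) := by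
  cases G with
  | nil =>
    rw [List.flatMap_nil, List.append_nil, pv_join_append "\n" base [""] hbase (by simp),
      pv_join_singleton, List.map_nil, pv_join_singleton, String.append_empty]
  | cons j G' =>
    have hflat : (j :: G').flatMap f ≠ [] := by
      rw [List.flatMap_cons]
      cases hfj : f j with
      | nil => exact absurd hfj (hf j (by simp))
      | cons a t => simp
    obtain ⟨a, t, hat⟩ := List.exists_cons_of_ne_nil hflat
    rw [List.append_assoc, pv_join_append "\n" base ([""] ++ (j :: G').flatMap f) hbase (by simp),
      hat, List.singleton_append, pv_join_cons_cons, ← hat,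
      pv_join_flatMap "\n" (j :: G') f hf, List.map_cons, pv_join_cons_cons]
    simp only [String.empty_append, String.append_assoc]

-- A's joined block lines = B's _block string
theorem pv_block_eq (j t : String) (rows : List String) (h : rows ≠ []) :
    PySem.Str.join "\n" (["<details>", "<summary>" ++ j ++ " (" ++ t ++ ")</summary>", ""]
        ++ rows ++ ["", "</details>"])
      = "<details>\n<summary>" ++ j ++ " (" ++ t ++ ")</summary>\n\n"
          ++ PySem.Str.join "\n" rows ++ "\n\n</details>" := by
  have h1 : ("<details>\n<summary>" : String) = "<details>" ++ "\n" ++ "<summary>" := by decide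
  have h2 : (")</summary>\n\n" : String) = ")</summary>" ++ "\n" ++ "" ++ "\n" := by decide
  have h3 : ("\n\n</details>" : String) = "\n" ++ "" ++ "\n" ++ "</details>" := by decide
  rw [List.append_assoc, pv_join_append _ _ _ (by simp) (by simp [h]),
    pv_join_append _ _ _ h (by simp)]
  rw [h1, h2, h3]
  simp only [pv_join_cons_cons, pv_join_singleton, String.append_assoc, String.append_empty,
    String.empty_append]

set_option maxHeartbeats 2000000 in
theorem pv_body_eq (cases : List (List (String × String))) (run_url : String) (error_note : Option String) :
    render_comment cases run_url error_note = render_comment_alt cases run_url error_note := by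
  have hkeys := pv_grouped_keys cases (fun c => group_name (pvGet c "classname"))
  have hord := pv_sorted2_flatMap cases (fun c => group_name (pvGet c "classname"))
    (fun c => pvGet c "name")
  have hpwne : (pvGroups (fun c => group_name (pvGet c "classname")) cases).Pairwise (· ≠ ·) :=
    (pv_groups_pairwise _ _).imp ne_of_lt
  have hne : ∀ j ∈ pvGroups (fun c => group_name (pvGet c "classname")) cases,
      pvBuck (fun c => group_name (pvGet c "classname")) (fun c => pvGet c "name") cases j ≠ [] := by
    intro j hj hnil
    unfold pvBuck at hnil
    rw [PySem.List.sorted_eq_nil_iff] at hnil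
    obtain ⟨c, hc, hgc⟩ := List.mem_map.mp ((pv_mem_groups _ _ j).mp hj)
    have := List.filter_eq_nil_iff.mp hnil c hc
    simp [hgc] at this
  have hblocks := pv_blocks_flat
      (pvGroups (fun c => group_name (pvGet c "classname")) cases)
      (pvBuck (fun c => group_name (pvGet c "classname")) (fun c => pvGet c "name") cases)
      hpwne hne (fun j _ a ha => pv_mem_buck (fun c => group_name (pvGet c "classname"))
        (fun c => pvGet c "name") cases j a ha)
  unfold render_comment render_comment_alt
  simp only [pv_status_eq, List.isEmpty_map, pv_totals_tally]
  rw [hkeys, hord, hblocks, pv_foldl3]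
  have hbuckfn : ∀ j, (PySem.List.sorted (cases.filter
        (fun c => group_name (pvGet c "classname") == j)) (fun c => pvGet c "name") false)
      = pvBuck (fun c => group_name (pvGet c "classname")) (fun c => pvGet c "name") cases j :=
    fun j => rfl
  have hflatfn : ∀ j, (["<details>", "<summary>" ++ j ++ " ("
          ++ pvTally ((cases.foldl (fun d c => d.modify (group_name (pvGet c "classname")) []
              (fun l => l ++ [c])) PySem.Dict.empty).getD j [] |>.map (fun c => pvGet c "status"))
          ++ ")</summary>", ""]
        ++ ((PySem.List.sorted ((cases.foldl (fun d c => d.modify (group_name (pvGet c "classname")) []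
              (fun l => l ++ [c])) PySem.Dict.empty).getD j [])
            (fun c => pvGet c "name") false).map pvCaseLine)
        ++ ["", "</details>"])
      = (["<details>", "<summary>" ++ j ++ " ("
          ++ pvTally ((pvBuck (fun c => group_name (pvGet c "classname"))
              (fun c => pvGet c "name") cases j).map (fun c => pvGet c "status"))
          ++ ")</summary>", ""]
        ++ ((pvBuck (fun c => group_name (pvGet c "classname"))
              (fun c => pvGet c "name") cases j).map pvCaseLine)
        ++ ["", "</details>"]) := by
    intro j
    rw [pv_grouped_getD cases (fun c => group_name (pvGet c "classname")) j]
    have hperm : ((cases.filter (fun c => group_name (pvGet c "classname") == j)).map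
          (fun c => pvGet c "status")).Perm
        ((pvBuck (fun c => group_name (pvGet c "classname")) (fun c => pvGet c "name") cases j).map
          (fun c => pvGet c "status")) :=
      (List.Perm.map _ (PySem.List.sorted_perm _ _ _)).symm
    rw [pv_tally_perm _ _ hperm]
    rfl
  rw [List.flatMap_congr (fun j _ => hflatfn j)]
  rw [show PySem.List.sorted (PySem.Set.ofList (cases.map (fun c => group_name (pvGet c "classname"))))
      (fun g => g) false = pvGroups (fun c => group_name (pvGet c "classname")) cases from rfl]
  have hblock : ∀ j ∈ pvGroups (fun c => group_name (pvGet c "classname")) cases,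
      PySem.Str.join "\n" (["<details>", "<summary>" ++ j ++ " ("
          ++ pvTally ((pvBuck (fun c => group_name (pvGet c "classname"))
              (fun c => pvGet c "name") cases j).map (fun c => pvGet c "status"))
          ++ ")</summary>", ""]
        ++ ((pvBuck (fun c => group_name (pvGet c "classname"))
              (fun c => pvGet c "name") cases j).map pvCaseLine)
        ++ ["", "</details>"])
      = pvBlockStr j (pvBuck (fun c => group_name (pvGet c "classname"))
          (fun c => pvGet c "name") cases j) := by
    intro j hj
    rw [pv_block_eq j _ _ (by simp [hne j hj])]
    rfl
  have hFne : ∀ j ∈ pvGroups (fun c => group_name (pvGet c "classname")) cases,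
      (["<details>", "<summary>" ++ j ++ " ("
          ++ pvTally ((pvBuck (fun c => group_name (pvGet c "classname"))
              (fun c => pvGet c "name") cases j).map (fun c => pvGet c "status"))
          ++ ")</summary>", ""]
        ++ ((pvBuck (fun c => group_name (pvGet c "classname"))
              (fun c => pvGet c "name") cases j).map pvCaseLine)
        ++ ["", "</details>"]) ≠ ([] : List String) := by
    intro j _
    simp
  by_cases hn : pvTruthyNote error_note
  · simp only [hn, if_true]
    refine congrArg (fun x => PySem.Str.strip x ++ "\n") ?_
    rw [pv_join_structure _ (by simp) _ _ hFne]
    rw [List.map_congr_left hblock]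
    rw [pv_join_append "\n" _ ["", "Note: " ++ error_note.getD ""] (by simp) (by simp)]
    simp only [List.cons_append, List.nil_append]
    rw [pv_header_eq, pv_note_eq]
  · simp only [hn, Bool.false_eq_true, if_false]
    refine congrArg (fun x => PySem.Str.strip x ++ "\n") ?_
    rw [pv_join_structure _ (by simp) _ _ hFne]
    rw [List.map_congr_left hblock]
    simp only [List.cons_append, List.nil_append]
    rw [pv_header_eq]

-- ===== VERDICT (by name: the statement is the Claim_ definition above) =====
theorem render_comment_spec : Claim_equal_render_comment := by
  intro cases run_url error_note _ _
  unfold Spec_render_comment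
  exact pv_body_eq cases run_url error_note
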